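-- pv_equiv track=rewrite | github.com/Wsgamer7/cs61a | function/tail_recursive.py | factorial2
-- ===== SOURCE A (Python) =====
-- def factorial2(n, k):
--     """
--     Compute n! * k
--     >>> factorial2(3,1)
--     3
--     """
--     result = k
--     if n == 0:
--         return result
--     else:
--         for i in range(2, n +1):
--             result = result* i
--         return result
-- ===== SOURCE B (Python) =====
-- def _prod_range(lo, hi):
--     """Product of integers lo, lo+1, ..., hi-1 by binary splitting."""
--     if hi - lo <= 0:
--         return 1
--     if hi - lo == 1:
--         return lo
--     mid = lo + (hi - lo) // 2
--     return _prod_range(lo, mid) * _prod_range(mid, hi)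
--
-- def factorial2(n, k):
--     """Compute n! * k as k times the binary-split product of 2..n."""
--     return k * _prod_range(2, n + 1)
-- ===== Notes on version B (the rewrite author's own statement) =====
-- stated objective: alternative
-- what changed: Replaced the linear accumulation loop (with its n==0 special case) by a divide-and-conquer binary-splitting product of the range 2..n, multiplied by k once at the end.
import Mathlib
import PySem

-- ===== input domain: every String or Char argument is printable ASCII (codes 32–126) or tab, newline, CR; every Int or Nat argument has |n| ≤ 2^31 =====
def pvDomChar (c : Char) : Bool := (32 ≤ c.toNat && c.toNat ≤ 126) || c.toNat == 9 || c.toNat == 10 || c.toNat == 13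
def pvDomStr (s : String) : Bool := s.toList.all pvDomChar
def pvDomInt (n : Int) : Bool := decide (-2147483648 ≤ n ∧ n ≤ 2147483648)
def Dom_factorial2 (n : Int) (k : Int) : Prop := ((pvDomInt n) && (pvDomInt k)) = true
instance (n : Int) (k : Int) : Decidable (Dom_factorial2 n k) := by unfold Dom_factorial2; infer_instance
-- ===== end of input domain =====

-- B replaces A's linear accumulation loop by a divide-and-conquer binary-splitting product of 2..n, multiplied by k once (objective: alternative).


-- ===== PORT A =====
def factorial2 (n : Int) (k : Int) : Int :=
  if n == 0 then k
  else (PySem.List.pyRange 2 (n + 1) 1).foldl (fun result i => result * i) k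

-- ===== PORT B =====
-- product of lo, lo+1, …, hi-1 by binary splitting; (hi-lo)//2 with hi-lo > 0 is exact as Lean's Int division
def prodRange (lo : Int) (hi : Int) : Int :=
  if hi - lo ≤ 0 then 1
  else if hi - lo = 1 then lo
  else
    let mid := lo + (hi - lo) / 2
    prodRange lo mid * prodRange mid hi
termination_by (hi - lo).toNat
decreasing_by all_goals omega

def factorial2_alt (n : Int) (k : Int) : Int :=
  k * prodRange 2 (n + 1)

-- ===== PRECONDITION & SPEC =====
def Spec_factorial2 (n : Int) (k : Int) (out : Int) : Prop := out = factorial2_alt n k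
instance (n : Int) (k : Int) (out : Int) : Decidable (Spec_factorial2 n k out) := by unfold Spec_factorial2; infer_instance

-- ===== CLAIM =====
def Claim_equal_factorial2 : Prop := ∀ (n : Int) (k : Int), Dom_factorial2 n k → Spec_factorial2 n k (factorial2 n k)

-- ===== LEMMAS AND PROOFS =====
theorem pyRange_split (lo mid hi : Int) (h1 : lo ≤ mid) (h2 : mid ≤ hi) :
    PySem.List.pyRange lo hi 1 = PySem.List.pyRange lo mid 1 ++ PySem.List.pyRange mid hi 1 := by
  rw [PySem.List.pyRange_one, PySem.List.pyRange_one, PySem.List.pyRange_one]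
  have h : (hi - lo).toNat = (mid - lo).toNat + (hi - mid).toNat := by omega
  rw [h, List.range_add, List.map_append, List.map_map]
  congr 1
  apply List.map_congr_left
  intro a _
  simp only [Function.comp]
  push_cast
  omega

theorem prodRange_eq (lo hi : Int) : prodRange lo hi = (PySem.List.pyRange lo hi 1).prod := by
  rw [prodRange]
  split_ifs with h1 h2
  · rw [PySem.List.pyRange_one_eq_nil (by omega : hi ≤ lo)]; rfl
  · rw [PySem.List.pyRange_one_cons (by omega : lo < hi),
        PySem.List.pyRange_one_eq_nil (by omega : hi ≤ lo + 1)]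
    simp
  · show prodRange lo (lo + (hi - lo) / 2) * prodRange (lo + (hi - lo) / 2) hi = _
    rw [prodRange_eq lo (lo + (hi - lo) / 2), prodRange_eq (lo + (hi - lo) / 2) hi,
        pyRange_split lo (lo + (hi - lo) / 2) hi (by omega) (by omega), List.prod_append]
termination_by (hi - lo).toNat
decreasing_by all_goals omega

theorem foldl_mul (l : List Int) (k : Int) :
    l.foldl (fun result i => result * i) k = k * l.prod := by
  induction l generalizing k with
  | nil => simp
  | cons x xs ih => simp [ih, mul_assoc]

-- ===== VERDICT =====
theorem factorial2_spec : Claim_equal_factorial2 := by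
  intro n k _
  unfold Spec_factorial2 factorial2 factorial2_alt
  rw [prodRange_eq, foldl_mul]
  by_cases h0 : n = 0
  · subst h0
    rw [PySem.List.pyRange_one_eq_nil (by omega : (0:Int) + 1 ≤ 2)]
    simp
  · simp [h0]
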